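-- pv_equiv track=rewrite | github.com/sharma-anubhav/CrackingTheCodingInterview-DSA | ch41(Greedy)/41.2.py | timetravel
-- ===== SOURCE A (Python) =====
-- def timetravel(jp, k, max_age):
--     jumps = [(jp[i+1]-jp[i], i) for i in range(len(jp)-1)]
--     jumps.sort(key = lambda x: x[0], reverse=True)
--     jump_indexes = set()
--     for i in range(k):
--         _, index = jumps[i]
--         jump_indexes.add(index)
--
--     cur_age = 0
--     for i in range(len(jp)-1):
--         if i not in jump_indexes:
--             cur_age+=(jp[i+1]-jp[i])
--     return cur_age <= max_age
-- ===== SOURCE B (Python) =====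
-- def _topk_sum(g, k):
--     # sum of the k largest values of g (all of g if k >= len, 0 if k <= 0),
--     # by three-way quickselect partitioning -- no sorting.
--     if k <= 0:
--         return 0
--     if len(g) <= k:
--         return sum(g)
--     p = g[0]
--     hi = [x for x in g if x > p]
--     if k <= len(hi):
--         return _topk_sum(hi, k)
--     eq = [x for x in g if x == p]
--     if k <= len(hi) + len(eq):
--         return sum(hi) + p * (k - len(hi))
--     lo = [x for x in g if x < p]
--     return sum(hi) + sum(eq) + _topk_sum(lo, k - len(hi) - len(eq))
--
--
-- def timetravel(jp, k, max_age):
--     total = jp[-1] - jp[0] if jp else 0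
--     gaps = [b - a for a, b in zip(jp, jp[1:])]
--     return total - _topk_sum(gaps, k) <= max_age
-- ===== Notes on version B (the rewrite author's own statement) =====
-- stated objective: faster
-- what changed: B never sorts: it gets the total age by telescoping (jp[-1]-jp[0]), subtracts the sum of the k largest gaps computed by a three-way quickselect recursion, and compares to max_age; A instead sorts (gap,index) pairs descending, collects the k skipped indices in a set and re-sums the remaining gaps in a second pass.
import Mathlib
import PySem

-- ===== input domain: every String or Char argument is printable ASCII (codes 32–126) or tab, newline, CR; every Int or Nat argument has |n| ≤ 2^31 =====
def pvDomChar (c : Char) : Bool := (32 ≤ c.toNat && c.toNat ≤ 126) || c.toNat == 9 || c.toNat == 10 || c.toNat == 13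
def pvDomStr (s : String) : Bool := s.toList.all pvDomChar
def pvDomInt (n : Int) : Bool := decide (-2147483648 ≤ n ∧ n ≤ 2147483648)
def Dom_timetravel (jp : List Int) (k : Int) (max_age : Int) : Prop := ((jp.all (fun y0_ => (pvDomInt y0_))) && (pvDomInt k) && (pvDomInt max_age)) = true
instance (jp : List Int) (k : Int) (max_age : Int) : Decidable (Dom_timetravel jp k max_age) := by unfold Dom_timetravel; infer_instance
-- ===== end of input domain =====

-- B drops A's sort entirely: total age by telescoping jp[-1]-jp[0], minus the sum of the k
-- largest gaps found by three-way quickselect; objective: faster (measured).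

-- ===== PORT A =====
def timetravel (jp : List Int) (k : Int) (max_age : Int) : Bool :=
  let jumps := (PySem.List.pyRange 0 ((jp.length : Int) - 1) 1).map
    (fun i => (PySem.List.pyGetD jp (i + 1) 0 - PySem.List.pyGetD jp i 0, i))
  let jumpsS := PySem.List.sorted jumps (fun x => x.1) true
  let jump_indexes := (PySem.List.pyRange 0 k 1).foldl
    (fun s i => PySem.Set.add s (PySem.List.pyGetD jumpsS i (0, 0)).2)
    (PySem.Set.empty)
  let cur_age := (PySem.List.pyRange 0 ((jp.length : Int) - 1) 1).foldl
    (fun acc i => if PySem.Set.contains jump_indexes i then acc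
                  else acc + (PySem.List.pyGetD jp (i + 1) 0 - PySem.List.pyGetD jp i 0)) 0
  decide (cur_age ≤ max_age)

-- ===== PORT B =====
-- _topk_sum: sum of the k largest values by three-way quickselect partitioning (pivot = g[0]).
-- The Nat fuel (initially the list length, strictly larger than every recursive partition)
-- only makes the recursion structural; it never changes the computed value.
def pvTopkSumGo : Nat → List Int → Int → Int
  | _, [], _ => 0
  | 0, _ :: _, _ => 0
  | fuel + 1, p :: t, k =>
    if k ≤ 0 then 0
    else if (((p :: t).length : Int)) ≤ k then (p :: t).sum
    else
      let hi := (p :: t).filter (fun x => p < x)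
      if k ≤ (hi.length : Int) then pvTopkSumGo fuel hi k
      else
        let eqs := (p :: t).filter (fun x => x = p)
        if k ≤ (hi.length : Int) + (eqs.length : Int) then hi.sum + p * (k - (hi.length : Int))
        else
          let lo := (p :: t).filter (fun x => x < p)
          hi.sum + eqs.sum + pvTopkSumGo fuel lo (k - (hi.length : Int) - (eqs.length : Int))

def pvTopkSum (g : List Int) (k : Int) : Int := pvTopkSumGo g.length g k

def timetravel_alt (jp : List Int) (k : Int) (max_age : Int) : Bool :=
  let total := if jp ≠ [] then PySem.List.pyGetD jp (-1) 0 - PySem.List.pyGetD jp 0 0 else 0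
  let gaps := (jp.zip (PySem.List.slice jp (some 1) none)).map (fun q => q.2 - q.1)
  decide (total - pvTopkSum gaps k ≤ max_age)

-- ===== PRECONDITION & SPEC =====
-- Pre_ excludes exactly the inputs where A raises IndexError: k larger than the number of jumps.
def Pre_timetravel (jp : List Int) (k : Int) (max_age : Int) : Prop :=
  k ≤ (jp.length : Int) - 1 ∨ k ≤ 0
instance (jp : List Int) (k : Int) (max_age : Int) : Decidable (Pre_timetravel jp k max_age) := by
  unfold Pre_timetravel; infer_instance
def pvWitness_timetravel : List Int × Int × Int := ([1, 3, 10, 11], 1, 5)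

def Spec_timetravel (jp : List Int) (k : Int) (max_age : Int) (out : Bool) : Prop := out = timetravel_alt jp k max_age
instance (jp : List Int) (k : Int) (max_age : Int) (out : Bool) : Decidable (Spec_timetravel jp k max_age out) := by unfold Spec_timetravel; infer_instance

-- ===== CLAIM (what is proved, stated in full; the proofs are below) =====
def Claim_equal_timetravel : Prop := ∀ (jp : List Int) (k : Int) (max_age : Int), Dom_timetravel jp k max_age → Pre_timetravel jp k max_age → Spec_timetravel jp k max_age (timetravel jp k max_age)

-- ===== LEMMAS AND PROOFS =====

lemma mem_foldl_set_add (x : Int) (Lst : List Int) (f : Int → Int) (s : PySem.Set Int) :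
    x ∈ Lst.foldl (fun s i => PySem.Set.add s (f i)) s ↔ x ∈ s ∨ x ∈ Lst.map f := by
  induction Lst generalizing s with
  | nil => simp
  | cons a t ih => simp [List.foldl_cons, ih, PySem.Set.mem_add, or_assoc, eq_comm]

lemma map_pyGetD_range_take {α : Type} (xs : List α) (d : α) (kk : Int)
    (h : kk.toNat ≤ xs.length) :
    (PySem.List.pyRange 0 kk 1).map (fun i => PySem.List.pyGetD xs i d) = xs.take kk.toNat := by
  rw [PySem.List.pyRange_one, List.map_map]
  apply List.ext_getElem
  · simp; omega
  · intro i h1 h2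
    simp [PySem.List.pyGetD_natCast]
    rw [List.getElem?_eq_getElem (by simp at h2; omega)]
    rfl

lemma sum_const_of_all_eq (p : Int) : ∀ (l : List Int), (∀ x ∈ l, x = p) → l.sum = p * l.length := by
  intro l
  induction l with
  | nil => simp
  | cons a t ih =>
    intro h
    rw [List.sum_cons, ih (fun x hx => h x (List.mem_cons_of_mem a hx)),
      h a (List.mem_cons_self)]
    simp only [List.length_cons]
    push_cast
    ring

lemma sorted_decomp (p : Int) : ∀ (s : List Int), s.Pairwise (fun a b => b ≤ a) →
    s = s.filter (fun x => p < x) ++ s.filter (fun x => x = p) ++ s.filter (fun x => x < p) := by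
  intro s
  induction s with
  | nil => simp
  | cons a rest ih =>
    intro hp
    obtain ⟨hall, hrest⟩ := List.pairwise_cons.mp hp
    have hR := ih hrest
    rcases lt_trichotomy a p with h | h | h
    · have h1 : rest.filter (fun x => decide (p < x)) = [] :=
        List.filter_eq_nil_iff.mpr (fun x hx => by
          have := hall x hx; simp; omega)
      have h2 : rest.filter (fun x => decide (x = p)) = [] :=
        List.filter_eq_nil_iff.mpr (fun x hx => by
          have := hall x hx; simp; omega)
      have h3 : rest.filter (fun x => decide (x < p)) = rest :=
        List.filter_eq_self.mpr (fun x hx => by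
          have := hall x hx; simp; omega)
      have e1 : decide (p < a) = false := by simp; omega
      have e2 : decide (a = p) = false := by simp; omega
      have e3 : decide (a < p) = true := by simp [h]
      simp only [List.filter_cons, e1, e2, e3, if_true, Bool.false_eq_true, if_false,
        h1, h2, h3, List.nil_append]
    · subst h
      have h1 : rest.filter (fun x => decide (a < x)) = [] :=
        List.filter_eq_nil_iff.mpr (fun x hx => by
          have := hall x hx; simp; omega)
      have e1 : decide (a < a) = false := by simp
      have e2 : decide (a = a) = true := by simp
      have hrec : rest = rest.filter (fun x => decide (x = a)) ++ rest.filter (fun x => decide (x < a)) := by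
        conv_lhs => rw [hR]
        rw [h1]; simp
      simp only [List.filter_cons, e1, Bool.false_eq_true, if_false, h1,
        List.nil_append]
      exact congrArg (a :: ·) hrec
    · have e1 : decide (p < a) = true := by simp [h]
      have e2 : decide (a = p) = false := by simp; omega
      have e3 : decide (a < p) = false := by simp; omega
      simp only [List.filter_cons, e1, e2, e3, if_true, Bool.false_eq_true, if_false,
        List.cons_append]
      exact congrArg (a :: ·) hR

-- pvTopkSumGo computes the sum of the first k of any descending-sorted permutation.
lemma pvTopkSumGo_spec : ∀ (fuel : Nat) (g : List Int), g.length ≤ fuel →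
    ∀ (k : Int) (s : List Int), s.Perm g → s.Pairwise (fun a b => b ≤ a) →
    pvTopkSumGo fuel g k = (s.take k.toNat).sum := by
  intro fuel
  induction fuel with
  | zero =>
    intro g hlen k s hperm hsorted
    have hg : g = [] := List.eq_nil_of_length_eq_zero (Nat.le_zero.mp hlen)
    subst hg
    have hs : s = [] := List.Perm.eq_nil hperm
    simp [pvTopkSumGo, hs]
  | succ fuel ih =>
    intro g hlen k s hperm hsorted
    match g with
    | [] =>
      have hs : s = [] := List.Perm.eq_nil hperm
      simp [pvTopkSumGo, hs]
    | p :: t =>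
      simp only [pvTopkSumGo]
      set hi := (p :: t).filter (fun x => p < x) with hhi
      set eqs := (p :: t).filter (fun x => x = p) with heqs
      set lo := (p :: t).filter (fun x => x < p) with hlo
      set A' := s.filter (fun x => p < x) with hA'
      set B' := s.filter (fun x => x = p) with hB'
      set C' := s.filter (fun x => x < p) with hC'
      have hsdec : s = A' ++ B' ++ C' := sorted_decomp p s hsorted
      have hpermA : A'.Perm hi := hperm.filter _
      have hpermB : B'.Perm eqs := hperm.filter _
      have hpermC : C'.Perm lo := hperm.filter _
      have hlenA : A'.length = hi.length := hpermA.length_eq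
      have hlenB : B'.length = eqs.length := hpermB.length_eq
      have hlenC : C'.length = lo.length := hpermC.length_eq
      have hslen : s.length = t.length + 1 := by rw [hperm.length_eq]; simp
      have hhile : hi.length ≤ t.length := by
        rw [hhi, List.filter_cons]
        simp only [lt_irrefl, decide_false, Bool.false_eq_true, if_false]
        exact List.length_filter_le _ _
      have hlole : lo.length ≤ t.length := by
        rw [hlo, List.filter_cons]
        simp only [lt_irrefl, decide_false, Bool.false_eq_true, if_false]
        exact List.length_filter_le _ _
      have hlc : (p :: t).length = t.length + 1 := rfl
      split_ifs with hk0 hklen hkhi hkeq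
      · have : k.toNat = 0 := by omega
        simp [this]
      · have hs : s.take k.toNat = s :=
          List.take_of_length_le (by simp at hklen; omega)
        rw [hs, hperm.sum_eq]
      · -- k ≤ |hi| : recurse into hi
        have hAs : A'.Pairwise (fun a b => b ≤ a) :=
          hsorted.sublist List.filter_sublist
        rw [ih hi (by omega) k A' hpermA hAs]
        conv_rhs => rw [hsdec]
        rw [List.append_assoc, List.take_append_of_le_length (by omega)]
      · -- |hi| < k ≤ |hi| + |eqs|
        conv_rhs => rw [hsdec]
        have hAle : A'.length ≤ k.toNat := by omega
        rw [List.append_assoc, List.take_append, List.take_of_length_le hAle,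
          List.take_append_of_le_length (l₁ := B') (by omega),
          List.sum_append]
        have hBall : ∀ x ∈ B'.take (k.toNat - A'.length), x = p := fun x hx => by
          have := List.mem_filter.mp (List.mem_of_mem_take hx)
          simpa using this.2
        rw [sum_const_of_all_eq p _ hBall, hpermA.sum_eq,
          List.length_take_of_le (by omega)]
        have hcast : k - (hi.length : Int) = ((k.toNat - A'.length : Nat) : Int) := by omega
        rw [hcast]
      · -- recurse into lo
        conv_rhs => rw [hsdec]
        have hAle : A'.length ≤ k.toNat := by omega
        have hBle : A'.length + B'.length ≤ k.toNat := by omega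
        rw [List.take_append,
          List.take_of_length_le (by simp only [List.length_append]; omega),
          List.sum_append, List.sum_append, hpermA.sum_eq, hpermB.sum_eq]
        have hCs : C'.Pairwise (fun a b => b ≤ a) :=
          hsorted.sublist List.filter_sublist
        rw [ih lo (by omega) (k - (hi.length : Int) - (eqs.length : Int)) C' hpermC hCs]
        have hcast : (k - (hi.length : Int) - (eqs.length : Int)).toNat
            = k.toNat - (A' ++ B').length := by
          simp only [List.length_append]; omega
        rw [hcast]

lemma telesc : ∀ (t : List Int) (a : Int),
    (((a :: t).zip t).map (fun q : Int × Int => q.2 - q.1)).sum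
      = (a :: t).getLast (List.cons_ne_nil a t) - a := by
  intro t
  induction t with
  | nil => simp
  | cons b t' ih =>
    intro a
    rw [List.zip_cons_cons, List.map_cons, List.sum_cons, ih b,
      List.getLast_cons (List.cons_ne_nil b t')]
    have hab : ((a, b) : Int × Int).2 - (a, b).1 = b - a := rfl
    rw [hab]
    ring

-- A's gap list (built by indexing) equals B's gap list (built by zipping with the tail).
lemma gaps_eq (jp : List Int) :
    (PySem.List.pyRange 0 ((jp.length : Int) - 1) 1).map
        (fun i => PySem.List.pyGetD jp (i + 1) 0 - PySem.List.pyGetD jp i 0)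
      = (jp.zip (PySem.List.slice jp (some 1) none)).map (fun q => q.2 - q.1) := by
  rw [PySem.List.slice_from_one, PySem.List.pyRange_one, List.map_map]
  apply List.ext_getElem
  · simp [List.length_zip]
  · intro i h1 h2
    simp only [List.getElem_map, List.getElem_range, Function.comp_apply]
    have hlt : i + 1 < jp.length := by simp at h1; omega
    have h0 : (0 : Int) + (i : Int) = ((i : Nat) : Int) := by omega
    rw [h0]
    have h1' : ((i : Nat) : Int) + 1 = (((i + 1 : Nat)) : Int) := by push_cast; ring
    rw [h1']
    rw [PySem.List.pyGetD_natCast, PySem.List.pyGetD_natCast]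
    rw [List.getElem_zip]
    rw [List.getD_eq_getElem jp 0 (by omega), List.getD_eq_getElem jp 0 (by omega),
      List.getElem_tail]

theorem timetravel_eq (jp : List Int) (k max_age : Int)
    (hpre : k ≤ (jp.length : Int) - 1 ∨ k ≤ 0) :
    timetravel jp k max_age = timetravel_alt jp k max_age := by
  simp only [timetravel, timetravel_alt]
  set L := PySem.List.pyRange 0 ((jp.length : Int) - 1) 1 with hL
  set g : Int → Int := fun i => PySem.List.pyGetD jp (i + 1) 0 - PySem.List.pyGetD jp i 0 with hg
  set J := L.map (fun i => (g i, i)) with hJ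
  set SD := PySem.List.sorted J (fun x => x.1) true with hSD
  set S := (PySem.List.pyRange 0 k 1).foldl
      (fun s i => PySem.Set.add s (PySem.List.pyGetD SD i (0, 0)).2) PySem.Set.empty with hS
  set gaps := (jp.zip (PySem.List.slice jp (some 1) none)).map
      (fun q : Int × Int => q.2 - q.1) with hgaps
  set k' := k.toNat with hk'
  have hJlen : J.length = ((jp.length : Int) - 1).toNat := by
    simp [hJ, hL, PySem.List.length_pyRange_one]
  have hperm : SD.Perm J := PySem.List.sorted_perm ..
  have hSDlen : SD.length = J.length := hperm.length_eq
  have hkle : k' ≤ SD.length := by rw [hSDlen, hJlen]; omega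
  -- membership in the built set
  have hmem : ∀ x : Int, x ∈ S ↔ x ∈ (SD.take k').map Prod.snd := by
    intro x
    rw [hS, mem_foldl_set_add x _ (fun i => (PySem.List.pyGetD SD i (0, 0)).2) PySem.Set.empty]
    have : (PySem.List.pyRange 0 k 1).map (fun i => (PySem.List.pyGetD SD i (0, 0)).2)
        = ((PySem.List.pyRange 0 k 1).map (fun i => PySem.List.pyGetD SD i (0, 0))).map Prod.snd := by
      rw [List.map_map]; rfl
    rw [this, map_pyGetD_range_take SD (0, 0) k hkle]
    simp [PySem.Set.empty]
    rw [hk']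
  have hmapsnd : J.map Prod.snd = L := by
    simp [hJ, List.map_map, Function.comp_def]
  have hnodup : (SD.map Prod.snd).Nodup := by
    rw [(hperm.map Prod.snd).nodup_iff, hmapsnd, hL]
    exact PySem.List.nodup_pyRange_one 0 _
  -- A's second loop as a sum over filtered pairs
  have hloop : L.foldl (fun acc i => if PySem.Set.contains S i then acc else acc + g i) 0
      = ((SD.filter (fun q => !PySem.Set.contains S q.2)).map Prod.fst).sum := by
    have h1 : L.foldl (fun acc i => if PySem.Set.contains S i then acc else acc + g i) 0
        = L.foldl (fun acc i => if (!PySem.Set.contains S i) = true then acc + g i else acc) 0 := by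
      apply PySem.List.foldl_congr_mem
      intro acc x _
      by_cases hc : PySem.Set.contains S x <;> simp_all
    rw [h1, PySem.List.foldl_if_eq_foldl_filter, PySem.List.foldl_add (g := g)]
    have h2 : (L.filter (fun i => !PySem.Set.contains S i)).map g
        = (J.filter (fun q => !PySem.Set.contains S q.2)).map Prod.fst := by
      rw [hJ, List.filter_map, List.map_map]; rfl
    rw [h2]
    have h3 : (J.filter (fun q => !PySem.Set.contains S q.2)).Perm
        (SD.filter (fun q => !PySem.Set.contains S q.2)) := (hperm.filter _).symm
    rw [(h3.map Prod.fst).sum_eq]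
    ring
  -- the filtered list is exactly the dropped suffix
  have happ : (SD.take k').map Prod.snd ++ (SD.drop k').map Prod.snd = SD.map Prod.snd := by
    rw [← List.map_append, List.take_append_drop]
  have hdisj : ((SD.take k').map Prod.snd).Disjoint ((SD.drop k').map Prod.snd) := by
    have h5 : ((SD.take k').map Prod.snd ++ (SD.drop k').map Prod.snd).Nodup := by
      rw [happ]; exact hnodup
    intro a h1 h2
    exact (List.nodup_append.mp h5).2.2 a h1 a h2 rfl
  have hfilter : SD.filter (fun q => !PySem.Set.contains S q.2) = SD.drop k' := by
    conv_lhs => rw [← List.take_append_drop k' SD]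
    rw [List.filter_append]
    have ht : (SD.take k').filter (fun q => !PySem.Set.contains S q.2) = [] := by
      apply List.filter_eq_nil_iff.mpr
      intro q hq
      simp
      exact (hmem q.2).mpr (List.mem_map_of_mem hq)
    have hd : (SD.drop k').filter (fun q => !PySem.Set.contains S q.2) = SD.drop k' := by
      apply List.filter_eq_self.mpr
      intro q hq
      simp
      intro hmm
      exact hdisj ((hmem q.2).mp hmm) (List.mem_map_of_mem hq)
    rw [ht, hd, List.nil_append]
  -- B: quickselect = sum of the first k of the descending first components of SD
  have hmapfst : J.map Prod.fst = gaps := by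
    rw [hJ, List.map_map, hgaps, ← gaps_eq jp]
    rfl
  have htopk : pvTopkSum gaps k = ((SD.map Prod.fst).take k').sum := by
    apply pvTopkSumGo_spec gaps.length gaps le_rfl k (SD.map Prod.fst)
    · exact (hperm.map Prod.fst).trans (hmapfst ▸ List.Perm.refl _)
    · exact (PySem.List.sorted_pairwise_rev J (fun x => x.1)).map Prod.fst (fun a b h => h)
  -- telescoping total = sum of all gaps
  have htot : (if jp ≠ [] then PySem.List.pyGetD jp (-1) 0 - PySem.List.pyGetD jp 0 0 else 0)
      = gaps.sum := by
    match jp with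
    | [] => simp [hgaps]
    | a :: t =>
      rw [if_pos (List.cons_ne_nil a t)]
      rw [PySem.List.pyGetD_neg_one (a :: t) 0 (List.cons_ne_nil a t),
        PySem.List.pyGetD_zero_cons]
      rw [hgaps, PySem.List.slice_from_one, List.tail_cons, telesc t a]
  rw [hloop, hfilter, htot, htopk]
  have hsplit : gaps.sum = ((SD.map Prod.fst).take k').sum + ((SD.drop k').map Prod.fst).sum := by
    rw [← hmapfst, ← (hperm.map Prod.fst).sum_eq, List.map_drop,
      ← List.sum_append, List.take_append_drop]
  rw [hsplit]
  have : ((SD.map Prod.fst).take k').sum + ((SD.drop k').map Prod.fst).sum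
      - ((SD.map Prod.fst).take k').sum = ((SD.drop k').map Prod.fst).sum := by ring
  rw [this]

-- ===== VERDICT (by name: the statement is the Claim_ definition above) =====
theorem timetravel_spec : Claim_equal_timetravel := by
  intro jp k max_age _ hpre
  unfold Spec_timetravel
  exact timetravel_eq jp k max_age hpre
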